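-- pv_equiv track=rewrite | github.com/Jackson5566/Pelayo-Social-Network-Backend | necesary_scripts/list_features.py | separate_by_vowels
-- ===== SOURCE A (Python) =====
-- def separate_by_vowels(string: str) -> list:
--     ultimo = 0
--     lista = []
--     vowels = ["a", "e", "i", "o", "u"]
--     for i in range(len(string)):
--         if string[i] in vowels:
--             lista.append(string[ultimo:i + 1].replace(" ", ""))
--             ultimo = i + 1
--
--     return lista
-- ===== SOURCE B (Python) =====
-- import re
--
-- def separate_by_vowels(string: str) -> list:
--     return [m.replace(" ", "") for m in re.findall(r'[^aeiou]*[aeiou]', string)]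
-- ===== Notes on version B (the rewrite author's own statement) =====
-- stated objective: idiomatic
-- what changed: Replaces the manual index loop with per-vowel re-slicing by a single regex findall of maximal non-vowel runs terminated by a vowel, stripping spaces per match.
import Mathlib
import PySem

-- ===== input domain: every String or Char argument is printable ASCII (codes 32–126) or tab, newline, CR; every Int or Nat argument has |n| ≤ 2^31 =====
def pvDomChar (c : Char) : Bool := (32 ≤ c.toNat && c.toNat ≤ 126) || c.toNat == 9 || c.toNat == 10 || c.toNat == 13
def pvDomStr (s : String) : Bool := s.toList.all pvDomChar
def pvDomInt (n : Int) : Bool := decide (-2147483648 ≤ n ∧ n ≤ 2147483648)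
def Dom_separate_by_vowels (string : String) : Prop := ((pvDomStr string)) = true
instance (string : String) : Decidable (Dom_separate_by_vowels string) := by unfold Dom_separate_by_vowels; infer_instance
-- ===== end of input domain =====

-- B replaces A's index loop (re-slicing from a saved position) by a regex-findall scan
-- of maximal non-vowel runs ending in a vowel, stripping spaces per match (idiomatic; same results).


-- ===== PORT A =====
-- literal transliteration of A: for i in range(len(string)): if string[i] in vowels:
--   lista.append(string[ultimo:i+1].replace(" ","")); ultimo = i+1
def separate_by_vowels (string : String) : List String :=
  let s := string.toList
  let vowels : List Char := ['a', 'e', 'i', 'o', 'u']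
  (PySem.List.pyRange 0 (s.length : Int) 1).foldl
    (fun (st : Int × List String) i =>
      match PySem.List.pyGet? s i with      -- string[i]; in range, so never none
      | some c =>
          if c ∈ vowels then
            (i + 1,
             st.2 ++ [String.ofList (PySem.Chars.replace
               (PySem.List.slice s (some st.1) (some (i + 1))) [' '] [])])
          else st
      | none => st)
    ((0 : Int), ([] : List String))
  |>.2

-- ===== PORT B =====
-- hand port of re.findall(r'[^aeiou]*[aeiou]', string): scan the characters, `cur` is the
-- non-vowel run matched so far; a vowel completes a match, trailing text yields no match.
-- Exact for this regex: matches are the disjoint maximal runs ending at each vowel.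
def pvFindall (cur : List Char) : List Char → List (List Char)
  | [] => []
  | c :: rest =>
      if c ∈ (['a', 'e', 'i', 'o', 'u'] : List Char) then
        (cur ++ [c]) :: pvFindall [] rest
      else pvFindall (cur ++ [c]) rest

def separate_by_vowels_alt (string : String) : List String :=
  (pvFindall [] string.toList).map
    (fun m => String.ofList (PySem.Chars.replace m [' '] []))

-- ===== PRECONDITION & SPEC =====
def Spec_separate_by_vowels (string : String) (out : List String) : Prop := out = separate_by_vowels_alt string
instance (string : String) (out : List String) : Decidable (Spec_separate_by_vowels string out) := by unfold Spec_separate_by_vowels; infer_instance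

-- ===== CLAIM (what is proved, stated in full; the proofs are below) =====
def Claim_equal_separate_by_vowels : Prop := ∀ (string : String), Dom_separate_by_vowels string → Spec_separate_by_vowels string (separate_by_vowels string)

-- ===== LEMMAS AND PROOFS =====

def pvStepA (s : List Char) (st : Int × List String) (i : Int) : Int × List String :=
  match PySem.List.pyGet? s i with
  | some c =>
      if c ∈ (['a', 'e', 'i', 'o', 'u'] : List Char) then
        (i + 1,
         st.2 ++ [String.ofList (PySem.Chars.replace
           (PySem.List.slice s (some st.1) (some (i + 1))) [' '] [])])
      else st
  | none => st

theorem pv_main (s : List Char) :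
    ∀ (m j u : Nat) (acc : List String), u ≤ j → j + m = s.length →
    (((List.range' j m).map (Nat.cast : Nat → Int)).foldl (pvStepA s) (((u : Nat) : Int), acc)).2
      = acc ++ (pvFindall ((s.drop u).take (j - u)) (s.drop j)).map
          (fun w => String.ofList (PySem.Chars.replace w [' '] [])) := by
  intro m
  induction m with
  | zero =>
      intro j u acc hu hj
      have hd : s.drop j = [] := List.drop_eq_nil_of_le (by omega)
      simp [hd, pvFindall]
  | succ m ih =>
      intro j u acc hu hj
      have hjlt : j < s.length := by omega
      have hget : PySem.List.pyGet? s ((j : Nat) : Int) = some s[j] := by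
        simp [hjlt]
      have hdrop : s.drop j = s[j] :: s.drop (j + 1) :=
        List.drop_eq_getElem_cons hjlt
      have h2 : (s.drop u)[j - u]? = some s[j] := by
        rw [List.getElem?_drop]
        have huj : u + (j - u) = j := by omega
        rw [huj]
        exact List.getElem?_eq_getElem hjlt
      have hpend : (s.drop u).take (j + 1 - u) = (s.drop u).take (j - u) ++ [s[j]] := by
        have h1 : j + 1 - u = (j - u) + 1 := by omega
        rw [h1, List.take_add_one, h2]
        rfl
      have hcast : ((j : Nat) : Int) + 1 = (((j + 1 : Nat)) : Int) := by push_cast; ring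
      rw [List.range'_succ, List.map_cons, List.foldl_cons]
      by_cases hv : s[j] ∈ (['a', 'e', 'i', 'o', 'u'] : List Char)
      · have hstep : pvStepA s (((u : Nat) : Int), acc) ((j : Nat) : Int)
            = ((((j + 1 : Nat)) : Int), acc ++ [String.ofList (PySem.Chars.replace
                ((s.drop u).take (j + 1 - u)) [' '] [])]) := by
          simp only [pvStepA, hget, hv, if_pos, hcast, PySem.List.slice_natCast]
        rw [hstep, ih (j + 1) (j + 1) _ (le_refl _) (by omega), hdrop]
        simp [pvFindall, hv, hpend]
      · have hstep : pvStepA s (((u : Nat) : Int), acc) ((j : Nat) : Int)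
            = (((u : Nat) : Int), acc) := by
          simp only [pvStepA, hget, hv, if_neg, not_false_iff]
        rw [hstep, ih (j + 1) u acc (by omega) (by omega), hdrop]
        simp [pvFindall, hv, hpend]

theorem pv_stepA_eq (s : List Char) :
    (fun (st : Int × List String) (i : Int) =>
      match PySem.List.pyGet? s i with
      | some c =>
          if c ∈ (['a', 'e', 'i', 'o', 'u'] : List Char) then
            (i + 1,
             st.2 ++ [String.ofList (PySem.Chars.replace
               (PySem.List.slice s (some st.1) (some (i + 1))) [' '] [])])
          else st
      | none => st) = pvStepA s := rfl

-- ===== VERDICT (by name: the statement is the Claim_ definition above) =====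
theorem separate_by_vowels_spec : Claim_equal_separate_by_vowels := by
  intro string _
  unfold Spec_separate_by_vowels separate_by_vowels separate_by_vowels_alt
  have hr : PySem.List.pyRange 0 (string.toList.length : Int) 1
      = (List.range' 0 string.toList.length).map (Nat.cast : Nat → Int) := by
    rw [PySem.List.pyRange_zero_natCast]
    simp [List.range_eq_range']
  simp only [hr, pv_stepA_eq]
  have h := pv_main string.toList string.toList.length 0 0 [] (le_refl 0) (by omega)
  simpa using h
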